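-- pv_equiv track=rewrite | github.com/ansible/ansible | lib/ansible/module_utils/xenserver.py | ip_prefix_to_netmask
-- ===== SOURCE A (Python) =====
-- def is_valid_ip_prefix(ip_prefix):
--     """Validates given string as IPv4 prefix.
--
--     Args:
--         ip_prefix (str): string to validate as IPv4 prefix.
--
--     Returns:
--         bool: True if string is valid IPv4 prefix, else False.
--     """
--     if not ip_prefix.isdigit():
--         return False
--
--     ip_prefix_int = int(ip_prefix)
--
--     if ip_prefix_int < 0 or ip_prefix_int > 32:
--         return False
--
--     return True
--
-- def ip_prefix_to_netmask(ip_prefix, skip_check=False):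
--     """Converts IPv4 prefix to netmask.
--
--     Args:
--         ip_prefix (str): IPv4 prefix to convert.
--         skip_check (bool): Skip validation of IPv4 prefix
--             (default: False). Use if you are sure IPv4 prefix is valid.
--
--     Returns:
--         str: IPv4 netmask equivalent to given IPv4 prefix if
--         IPv4 prefix is valid, else an empty string.
--     """
--     if skip_check:
--         ip_prefix_valid = True
--     else:
--         ip_prefix_valid = is_valid_ip_prefix(ip_prefix)
--
--     if ip_prefix_valid:
--         return '.'.join([str((0xffffffff << (32 - int(ip_prefix)) >> i) & 0xff) for i in [24, 16, 8, 0]])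
--     else:
--         return ""
-- ===== SOURCE B (Python) =====
-- def is_valid_ip_prefix(ip_prefix):
--     if not ip_prefix.isdigit():
--         return False
--     ip_prefix_int = int(ip_prefix)
--     if ip_prefix_int < 0 or ip_prefix_int > 32:
--         return False
--     return True
--
--
-- def ip_prefix_to_netmask(ip_prefix, skip_check=False):
--     if skip_check:
--         ip_prefix_valid = True
--     else:
--         ip_prefix_valid = is_valid_ip_prefix(ip_prefix)
--
--     if not ip_prefix_valid:
--         return ""
--
--     p = int(ip_prefix)
--     full, rem = divmod(p, 8)
--     octets = []
--     for i in range(4):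
--         if i < full:
--             octets.append(255)
--         elif i == full and rem:
--             octets.append((0xff << (8 - rem)) & 0xff)
--         else:
--             octets.append(0)
--     return '.'.join(str(o) for o in octets)
-- ===== Notes on version B (the rewrite author's own statement) =====
-- stated objective: alternative
-- what changed: Replaces A's global 32-bit shift-and-mask comprehension over [24,16,8,0] by a per-octet construction from full = p//8 and rem = p%8 (255 for the first full octets, one leftover-bits octet (0xff << (8-rem)) & 0xff, 0 for the rest), keeping the validation wrapper.
import Mathlib
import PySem

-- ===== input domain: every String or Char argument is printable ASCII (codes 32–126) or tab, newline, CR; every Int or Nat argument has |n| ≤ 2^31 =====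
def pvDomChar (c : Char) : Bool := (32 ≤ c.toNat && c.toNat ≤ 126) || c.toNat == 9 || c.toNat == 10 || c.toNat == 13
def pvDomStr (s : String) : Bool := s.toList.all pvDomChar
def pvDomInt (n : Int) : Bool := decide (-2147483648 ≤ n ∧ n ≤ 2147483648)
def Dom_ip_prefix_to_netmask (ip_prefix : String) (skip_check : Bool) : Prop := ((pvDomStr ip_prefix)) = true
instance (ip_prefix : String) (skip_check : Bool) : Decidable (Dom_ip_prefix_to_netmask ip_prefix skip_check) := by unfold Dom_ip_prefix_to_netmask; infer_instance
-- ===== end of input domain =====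

-- B replaces A's global 32-bit shift-and-mask comprehension by a per-octet full-bytes/leftover-bits
-- construction (objective: alternative, same cost); validation wrapper unchanged.

-- ===== PORT A =====
-- shared helper: both Pythons contain this identical validator
def is_valid_ip_prefix (ip_prefix : String) : Bool :=
  if !(PySem.Str.strIsdigit ip_prefix) then false
  else
    -- strIsdigit = true guarantees int(ip_prefix) succeeds; the getD 0 default is unreachable
    let ip_prefix_int := (PySem.Int.ofStr? ip_prefix).getD 0
    if ip_prefix_int < 0 ∨ ip_prefix_int > 32 then false else true

-- '0xffffffff << (32 - p)': the shift amount is (32 - p).toNat — exact whenever p ≤ 32;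
-- for p > 32 Python raises ValueError (negative shift), those inputs are outside Pre_.
def ip_prefix_to_netmask (ip_prefix : String) (skip_check : Bool) : String :=
  let ip_prefix_valid := if skip_check then true else is_valid_ip_prefix ip_prefix
  if ip_prefix_valid then
    PySem.Str.join "." (([24, 16, 8, 0] : List Nat).map (fun (i : Nat) =>
      PySem.Int.toStr (PySem.Int.band
        (((0xffffffff : Int) <<< (32 - (PySem.Int.ofStr? ip_prefix).getD 0).toNat) >>> i) 0xff)))
  else
    ""

-- ===== PORT B =====
def ip_prefix_to_netmask_alt (ip_prefix : String) (skip_check : Bool) : String :=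
  let ip_prefix_valid := if skip_check then true else is_valid_ip_prefix ip_prefix
  if !ip_prefix_valid then ""
  else
    let p := (PySem.Int.ofStr? ip_prefix).getD 0   -- int(ip_prefix); unreachable default as in port A
    let full := PySem.Int.floordiv p 8
    let rem := PySem.Int.mod p 8
    -- for i in range(4): append 255 / leftover-bits octet / 0
    -- '0xff << (8 - rem)': rem ∈ [0,7] always (floor mod, positive divisor), so (8-rem).toNat is exact
    let octets := (PySem.List.pyRange 0 4 1).foldl (fun acc i =>
      acc ++ [if i < full then (255 : Int)
              else if i = full ∧ rem ≠ 0 then PySem.Int.band ((0xff : Int) <<< (8 - rem).toNat) 0xff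
              else 0]) []
    PySem.Str.join "." (octets.map PySem.Int.toStr)

-- ===== PRECONDITION & SPEC =====
-- Pre_ excludes exactly the inputs where A raises ValueError: skip_check=True with a string
-- int() cannot parse, or parsing to a prefix > 32 (negative shift count).
def Pre_ip_prefix_to_netmask (ip_prefix : String) (skip_check : Bool) : Prop :=
  skip_check = true →
    ((PySem.Int.ofStr? ip_prefix).isSome = true ∧ (PySem.Int.ofStr? ip_prefix).getD 0 ≤ 32)
instance (ip_prefix : String) (skip_check : Bool) : Decidable (Pre_ip_prefix_to_netmask ip_prefix skip_check) := by unfold Pre_ip_prefix_to_netmask; infer_instance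

def pvWitness_ip_prefix_to_netmask : String × Bool := ("24", true)

def Spec_ip_prefix_to_netmask (ip_prefix : String) (skip_check : Bool) (out : String) : Prop := out = ip_prefix_to_netmask_alt ip_prefix skip_check
instance (ip_prefix : String) (skip_check : Bool) (out : String) : Decidable (Spec_ip_prefix_to_netmask ip_prefix skip_check out) := by unfold Spec_ip_prefix_to_netmask; infer_instance

-- ===== CLAIM (what is proved, stated in full; the proofs are below) =====
def Claim_equal_ip_prefix_to_netmask : Prop := ∀ (ip_prefix : String) (skip_check : Bool), Dom_ip_prefix_to_netmask ip_prefix skip_check → Pre_ip_prefix_to_netmask ip_prefix skip_check → Spec_ip_prefix_to_netmask ip_prefix skip_check (ip_prefix_to_netmask ip_prefix skip_check)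

-- ===== LEMMAS AND PROOFS =====

-- A's valid-branch body and B's valid-branch body, as functions of the parsed prefix
def pvCoreA (p : Int) : String :=
  PySem.Str.join "." (([24, 16, 8, 0] : List Nat).map (fun (i : Nat) =>
    PySem.Int.toStr (PySem.Int.band (((0xffffffff : Int) <<< (32 - p).toNat) >>> i) 0xff)))

def pvCoreB (p : Int) : String :=
  let full := PySem.Int.floordiv p 8
  let rem := PySem.Int.mod p 8
  let octets := (PySem.List.pyRange 0 4 1).foldl (fun acc i =>
    acc ++ [if i < full then (255 : Int)
            else if i = full ∧ rem ≠ 0 then PySem.Int.band ((0xff : Int) <<< (8 - rem).toNat) 0xff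
            else 0]) []
  PySem.Str.join "." (octets.map PySem.Int.toStr)

theorem portA_eq (s : String) (b : Bool) :
    ip_prefix_to_netmask s b =
      (if (if b then true else is_valid_ip_prefix s) then pvCoreA ((PySem.Int.ofStr? s).getD 0) else "") := rfl

theorem portB_eq (s : String) (b : Bool) :
    ip_prefix_to_netmask_alt s b =
      (if !(if b then true else is_valid_ip_prefix s) then "" else pvCoreB ((PySem.Int.ofStr? s).getD 0)) := rfl

theorem octetA_neg (e i : Nat) (he : 33 ≤ e) (hi : i ≤ 24) :
    PySem.Int.band (((0xffffffff : Int) <<< e) >>> i) 0xff = 0 := by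
  have h1 : ((0xffffffff : Int) <<< e) >>> i = (((0xffffffff <<< e) >>> i : Nat) : Int) := by
    exact_mod_cast rfl
  have h2 : ((0xffffffff : Nat) <<< e) >>> i = 0xffffffff * 2 ^ (e - i) := by
    rw [Nat.shiftLeft_eq, Nat.shiftRight_eq_div_pow,
        Nat.mul_div_assoc _ (pow_dvd_pow 2 (by omega)), Nat.pow_div (by omega) (by omega)]
  have hdvd : 256 ∣ 0xffffffff * 2 ^ (e - i) := by
    have h8 : (2 : Nat) ^ 8 ∣ 2 ^ (e - i) := pow_dvd_pow 2 (by omega)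
    exact Dvd.dvd.mul_left (by simpa using h8) _
  have h3 : (0xffffffff * 2 ^ (e - i)) &&& 255 = 0 := by
    have := Nat.and_two_pow_sub_one_eq_mod (0xffffffff * 2 ^ (e - i)) 8
    norm_num at this
    omega
  have h4 : (0xff : Int) = ((255 : Nat) : Int) := by norm_num
  rw [h1, h2, h4, PySem.Int.band_natCast]
  exact_mod_cast congrArg (fun n : Nat => (n : Int)) h3

theorem core_eq (p : Int) (hp : p ≤ 32) : pvCoreA p = pvCoreB p := by
  by_cases h0 : 0 ≤ p
  · interval_cases p <;> decide
  · -- negative prefix: both sides are "0.0.0.0"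
    have hf : PySem.Int.floordiv p 8 < 0 := by
      rw [PySem.Int.floordiv_lt_iff_lt_mul (by omega)]; omega
    have e33 : 33 ≤ (32 - p).toNat := by omega
    unfold pvCoreA pvCoreB
    simp only [List.map_cons, List.map_nil]
    rw [octetA_neg _ 24 e33 (by omega), octetA_neg _ 16 e33 (by omega),
        octetA_neg _ 8 e33 (by omega), octetA_neg _ 0 e33 (by omega)]
    have hr : PySem.List.pyRange 0 4 1 = [0, 1, 2, 3] := by decide
    simp only [hr, List.foldl]
    rw [if_neg (by omega), if_neg (by rintro ⟨h, -⟩; omega),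
        if_neg (by omega), if_neg (by rintro ⟨h, -⟩; omega),
        if_neg (by omega), if_neg (by rintro ⟨h, -⟩; omega),
        if_neg (by omega), if_neg (by rintro ⟨h, -⟩; omega)]
    decide

theorem valid_bounds (s : String) (h : is_valid_ip_prefix s = true) :
    0 ≤ (PySem.Int.ofStr? s).getD 0 ∧ (PySem.Int.ofStr? s).getD 0 ≤ 32 := by
  unfold is_valid_ip_prefix at h
  split_ifs at h with h1
  simp at h
  exact h

-- ===== VERDICT (by name: the statement is the Claim_ definition above) =====
theorem ip_prefix_to_netmask_spec : Claim_equal_ip_prefix_to_netmask := by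
  intro s b _ hpre
  unfold Spec_ip_prefix_to_netmask
  rw [portA_eq, portB_eq]
  cases b with
  | true =>
    obtain ⟨_, hle⟩ := hpre rfl
    simp only [if_true, Bool.not_true, Bool.false_eq_true, if_false]
    exact core_eq _ hle
  | false =>
    cases hv : is_valid_ip_prefix s with
    | false => simp
    | true =>
      simp only [Bool.not_true, Bool.false_eq_true, if_true, if_false]
      exact core_eq _ (valid_bounds s hv).2
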